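-- pv_equiv track=rewrite | github.com/johncardosa/itp-w2-collections-and-loops-practice | create_box/main.py | create_box
-- ===== SOURCE A (Python) =====
-- def create_box(height, width, character):
--   box_list = [[character for i in range(width)]for j in range(height)]
--   box = ""
--   for i in range(height):
--     for j in range(width):
--       box += box_list[i][j]
--     box += "\n"
--   return box
-- ===== SOURCE B (Python) =====
-- def create_box(height, width, character):
--     if height <= 0:
--         return ""
--     return (character * width + "\n") * height
-- ===== Notes on version B (the rewrite author's own statement) =====
-- stated objective: simpler
-- what changed: Replaces the nested list build and the two accumulation loops with a single closed-form string expression (character*width+'\n')*height.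
import Mathlib
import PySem

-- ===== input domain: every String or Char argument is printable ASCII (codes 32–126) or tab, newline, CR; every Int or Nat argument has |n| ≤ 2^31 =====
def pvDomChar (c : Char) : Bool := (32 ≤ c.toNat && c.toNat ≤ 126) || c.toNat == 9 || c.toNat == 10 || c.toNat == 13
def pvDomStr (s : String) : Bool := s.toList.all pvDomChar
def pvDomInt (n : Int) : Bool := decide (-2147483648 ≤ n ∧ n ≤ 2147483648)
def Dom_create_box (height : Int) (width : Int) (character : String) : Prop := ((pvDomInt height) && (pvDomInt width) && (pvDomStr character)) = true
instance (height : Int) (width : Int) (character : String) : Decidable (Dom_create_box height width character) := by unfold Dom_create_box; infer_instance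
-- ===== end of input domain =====

-- B replaces A's nested per-cell accumulation loops with the closed form (character*width + "\n")*height; objective: simpler.
-- ===== PORT A =====
def create_box (height : Int) (width : Int) (character : String) : String :=
  -- box_list = [[character for i in range(width)] for j in range(height)]
  let box_list : List (List (List Char)) :=
    (PySem.List.pyRange 0 height 1).map (fun _j =>
      (PySem.List.pyRange 0 width 1).map (fun _i => character.toList))
  -- box = ""; for i in range(height): for j in range(width): box += box_list[i][j]; box += "\n"
  let box : List Char :=
    (PySem.List.pyRange 0 height 1).foldl (fun box i =>
      ((PySem.List.pyRange 0 width 1).foldl (fun box j =>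
          box ++ PySem.List.pyGetD (PySem.List.pyGetD box_list i []) j []) box) ++ ['\n']) []
  String.mk box

-- ===== PORT B =====
def create_box_alt (height : Int) (width : Int) (character : String) : String :=
  if height ≤ 0 then ""
  else String.mk (PySem.List.pyRepeat (PySem.List.pyRepeat character.toList width ++ ['\n']) height)

-- ===== PRECONDITION & SPEC =====
def Spec_create_box (height : Int) (width : Int) (character : String) (out : String) : Prop := out = create_box_alt height width character
instance (height : Int) (width : Int) (character : String) (out : String) : Decidable (Spec_create_box height width character out) := by unfold Spec_create_box; infer_instance

-- ===== CLAIM (what is proved, stated in full; the proofs are below) =====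
def Claim_equal_create_box : Prop := ∀ (height : Int) (width : Int) (character : String), Dom_create_box height width character → Spec_create_box height width character (create_box height width character)

-- ===== LEMMAS AND PROOFS =====
-- a fold that appends a constant block per iteration flattens to 'replicate length'
theorem pv_flatMap_const {α β : Type} (l : List α) (c : List β) :
    l.flatMap (fun _ => c) = (List.replicate l.length c).flatten := by
  induction l with
  | nil => simp
  | cons x t ih => simp [ih, List.replicate_succ]

-- ===== VERDICT (by name: the statement is the Claim_ definition above) =====
theorem create_box_spec : Claim_equal_create_box := by
  intro height width character _
  unfold Spec_create_box create_box create_box_alt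
  by_cases hh : height ≤ 0
  · simp [hh, PySem.List.pyRange_one_eq_nil hh]
    rfl
  simp only [if_neg hh]
  congr 1
  rw [PySem.List.foldl_congr_mem (g := fun box (_ : Int) =>
        box ++ (PySem.List.pyRepeat character.toList width ++ ['\n']))]
  · rw [PySem.List.foldl_append_eq_flatMap, pv_flatMap_const]
    simp [PySem.List.pyRepeat, PySem.List.length_pyRange_one]
  · intro acc i hi
    rw [← List.append_assoc]
    congr 1
    rw [PySem.List.foldl_congr_mem (g := fun box (_ : Int) => box ++ character.toList)]
    · rw [PySem.List.foldl_append_eq_flatMap, pv_flatMap_const]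
      simp [PySem.List.pyRepeat, PySem.List.length_pyRange_one]
    · intro acc2 j hj
      rw [PySem.List.mem_pyRange_one] at hi hj
      congr 1
      rw [PySem.List.pyGetD_eq_getElem _ _ hi.1
        (by simp [PySem.List.length_pyRange_one]; omega)]
      simp only [List.getElem_map]
      rw [PySem.List.pyGetD_eq_getElem _ _ hj.1
        (by simp [PySem.List.length_pyRange_one]; omega)]
      simp
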